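-- pv_equiv track=rewrite | github.com/bossham/Algorithm | 프로그래머스/0/181874. A 강조하기/A 강조하기.py | solution
-- ===== SOURCE A (Python) =====
-- def solution(myString):
--     result = ''
--     for c in myString:
--         if c == 'a':
--             result += 'A'
--         elif c != 'A' and c.isupper():
--             result += c.lower()
--         else:
--             result += c
--     return result
-- ===== SOURCE B (Python) =====
-- def solution(myString):
--     return myString.lower().replace('a', 'A')
-- ===== Notes on version B (the rewrite author's own statement) =====
-- stated objective: faster
-- what changed: Replaces the explicit character loop with string concatenation by a two-pass closed form: lowercase the whole string, then replace the lowercase target letter with its uppercase form.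
import Mathlib
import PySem

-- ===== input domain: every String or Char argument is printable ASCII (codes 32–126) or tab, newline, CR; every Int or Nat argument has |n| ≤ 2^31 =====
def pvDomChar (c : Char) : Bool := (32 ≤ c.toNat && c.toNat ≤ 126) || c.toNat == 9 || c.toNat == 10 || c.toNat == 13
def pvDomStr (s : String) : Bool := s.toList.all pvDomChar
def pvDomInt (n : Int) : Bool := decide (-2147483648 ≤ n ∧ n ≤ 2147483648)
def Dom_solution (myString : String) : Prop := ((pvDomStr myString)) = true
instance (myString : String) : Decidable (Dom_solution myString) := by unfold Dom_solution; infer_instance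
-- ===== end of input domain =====

-- B replaces A's explicit per-character loop by the closed form lower-then-replace: same result, measured constant-factor speedup.


-- ===== PORT A =====
-- literal port of A: fold over the characters, appending to `result`
def solution (myString : String) : String :=
  myString.toList.foldl (fun result c =>
    if c == 'a' then result ++ "A"
    else if c != 'A' && PySem.Chars.isupper c then result ++ String.singleton (PySem.Chars.lowerChar c)
    else result ++ String.singleton c) ""

-- ===== PORT B =====
-- literal port of B: myString.lower().replace('a', 'A')
def solution_alt (myString : String) : String :=
  PySem.Str.replace (PySem.Str.lower myString) "a" "A"

-- ===== PRECONDITION & SPEC =====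
def Spec_solution (myString : String) (out : String) : Prop := out = solution_alt myString
instance (myString : String) (out : String) : Decidable (Spec_solution myString out) := by unfold Spec_solution; infer_instance

-- ===== CLAIM (what is proved, stated in full; the proofs are below) =====
def Claim_equal_solution : Prop := ∀ (myString : String), Dom_solution myString → Spec_solution myString (solution myString)

-- ===== LEMMAS AND PROOFS =====

-- the single-character substitution performed by replace('a','A')
def subA (c : Char) : Char := if c = 'a' then 'A' else c

-- the per-character transform A performs
def stepA (c : Char) : Char :=
  if c == 'a' then 'A'
  else if c != 'A' && PySem.Chars.isupper c then PySem.Chars.lowerChar c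
  else c

theorem replace_go_single (l acc : List Char) :
    PySem.Chars.replace.go ['a'] ['A'] l.length l acc = acc.reverse ++ l.map subA := by
  induction l generalizing acc with
  | nil => simp [PySem.Chars.replace.go]
  | cons c t ih =>
    by_cases h : c = 'a'
    · subst h
      simp only [List.length_cons, PySem.Chars.replace.go, List.isPrefixOf, beq_self_eq_true,
        Bool.true_and, if_true, List.drop_succ_cons, List.length_nil, List.drop_zero,
        List.reverse_singleton, List.singleton_append]
      rw [ih]
      simp [subA]
    · simp only [List.length_cons, PySem.Chars.replace.go, List.isPrefixOf]
      have hb : (('a' : Char) == c) = false := by simpa [beq_iff_eq] using fun hc => h hc.symm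
      simp only [hb, Bool.false_and]
      rw [ih]
      simp [subA, h]

theorem replace_single (l : List Char) :
    PySem.Chars.replace l ['a'] ['A'] = l.map subA := by
  simp only [PySem.Chars.replace, List.isEmpty]
  exact replace_go_single l []

theorem foldl_step (l : List Char) (res : String) :
    (l.foldl (fun result c =>
      if c == 'a' then result ++ "A"
      else if c != 'A' && PySem.Chars.isupper c then result ++ String.singleton (PySem.Chars.lowerChar c)
      else result ++ String.singleton c) res).toList = res.toList ++ l.map stepA := by
  induction l generalizing res with
  | nil => simp
  | cons c t ih =>
    simp only [List.foldl_cons, List.map_cons]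
    by_cases h1 : c = 'a'
    · subst h1
      simp only [beq_self_eq_true, if_true, ih]
      simp [stepA]
    · have hb : (c == 'a') = false := by simpa [beq_iff_eq] using h1
      simp only [hb]
      by_cases h2 : (c != 'A' && PySem.Chars.isupper c) = true
      · simp only [h2, if_true, ih]
        simp [stepA, hb, h2]
      · simp only [Bool.not_eq_true] at h2
        simp only [h2, ih]
        simp [stepA, hb, h2]

theorem step_eq_sub_lower (c : Char) : stepA c = subA (PySem.Chars.lowerChar c) := by
  unfold stepA subA PySem.Chars.lowerChar PySem.Chars.isupper
  by_cases hu : 'A' ≤ c ∧ c ≤ 'Z'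
  · have hn : 65 ≤ c.toNat ∧ c.toNat ≤ 90 := by
      obtain ⟨h1, h2⟩ := hu
      rw [Char.le_def] at h1 h2
      rw [UInt32.le_iff_toNat_le] at h1 h2
      exact ⟨h1, h2⟩
    have hv : (c.toNat + 32).isValidChar := Or.inl (by omega)
    have htn : (Char.ofNat (c.toNat + 32)).toNat = c.toNat + 32 := by
      rw [Char.toNat_ofNat, if_pos hv]
    by_cases hAA : c = 'A'
    · subst hAA; decide
    · have hne : (c != 'A') = true := by simpa using hAA
      have hle1 : decide ('A' ≤ c) = true := by simpa using hu.1
      have hle2 : decide (c ≤ 'Z') = true := by simpa using hu.2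
      simp only [hle1, hle2, Bool.and_self, if_true, hne]
      have hnot : Char.ofNat (c.toNat + 32) ≠ 'a' := by
        intro h
        have h97 : c.toNat + 32 = 97 := by
          have := congrArg Char.toNat h
          rw [htn] at this
          exact this
        have h65 : c.toNat = 65 := by omega
        apply hAA
        apply Char.ext; apply UInt32.ext
        show c.val.toNat = _
        rw [show (('A' : Char).val.toNat) = 65 from rfl]; exact h65
      have hA : c ≠ 'a' := by
        intro h; subst h; exact absurd hu.2 (by decide)
      have hbc : (c == 'a') = false := by simpa [beq_iff_eq] using hA
      simp [hbc, hnot]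
  · have hfalse : (decide ('A' ≤ c) && decide (c ≤ 'Z')) = false := by
      rcases not_and_or.mp hu with h | h <;> simp [h]
    simp only [hfalse, Bool.and_false]
    by_cases h1 : c = 'a'
    · subst h1; decide
    · have hbc : (c == 'a') = false := by simpa [beq_iff_eq] using h1
      simp [hbc, h1]

-- ===== VERDICT (by name: the statement is the Claim_ definition above) =====
theorem solution_spec : Claim_equal_solution := by
  intro s _
  unfold Spec_solution solution solution_alt
  apply String.ext
  rw [foldl_step]
  have : (PySem.Str.replace (PySem.Str.lower s) "a" "A").toList
      = PySem.Chars.replace (PySem.Chars.lower s.toList) ['a'] ['A'] := by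
    simp [PySem.Str.toList_replace, PySem.Str.toList_lower]
  rw [this, replace_single, PySem.Chars.lower, List.map_map]
  simp only [String.toList_empty, List.nil_append]
  exact List.map_congr_left (fun c _ => step_eq_sub_lower c)
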